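-- pv_equiv track=rewrite | github.com/SimonBuysse/forge | forge-gui/res/adventure/common/decks2/removesmallsize.py | parse_main_total
-- ===== SOURCE A (Python) =====
-- def parse_main_total(text: str) -> int | None:
--     lines = text.splitlines()
--     in_main = False
--     saw_main = False
--     total = 0
--
--     for raw in lines:
--         line = raw.strip()
--         if not line:
--             continue
--
--         # section header like [Main]
--         if line.startswith("[") and line.endswith("]"):
--             if line.lower() == "[main]":
--                 in_main = True
--                 saw_main = True
--             else:
--                 in_main = False
--             continue
--
--         if not in_main:
--             continue
--
--         # "<qty> <card name>"
--         parts = line.split(None, 1)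
--         if not parts:
--             continue
--         try:
--             qty = int(parts[0])
--         except ValueError:
--             continue
--
--         if qty > 0:
--             total += qty
--
--     return total if saw_main else None
-- ===== SOURCE B (Python) =====
-- def parse_main_total(text: str) -> int | None:
--     # Phase 1: group non-blank stripped lines into section bodies keyed by
--     # lowercased header; Phase 2: sum positive leading integers of the
--     # '[main]' body (absent key -> None).
--     lines = [ln for ln in (raw.strip() for raw in text.splitlines()) if ln]
--     bodies = {}
--     current = None
--     for ln in lines:
--         if ln.startswith("[") and ln.endswith("]"):
--             current = ln.lower()
--             bodies.setdefault(current, [])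
--         elif current is not None:
--             bodies[current].append(ln)
--     if "[main]" not in bodies:
--         return None
--     total = 0
--     for ln in bodies["[main]"]:
--         parts = ln.split(None, 1)
--         try:
--             q = int(parts[0])
--         except ValueError:
--             continue
--         if q > 0:
--             total += q
--     return total
-- ===== Notes on version B (the rewrite author's own statement) =====
-- stated objective: alternative
-- what changed: B replaces A's single pass with in_main/saw_main boolean state by a two-phase decomposition: a grouping pass that builds a dict from lowercased section header to its accumulated body lines, then a dict membership test (replacing saw_main) and a separate summing pass over only the '[main]' body.
import Mathlib
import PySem

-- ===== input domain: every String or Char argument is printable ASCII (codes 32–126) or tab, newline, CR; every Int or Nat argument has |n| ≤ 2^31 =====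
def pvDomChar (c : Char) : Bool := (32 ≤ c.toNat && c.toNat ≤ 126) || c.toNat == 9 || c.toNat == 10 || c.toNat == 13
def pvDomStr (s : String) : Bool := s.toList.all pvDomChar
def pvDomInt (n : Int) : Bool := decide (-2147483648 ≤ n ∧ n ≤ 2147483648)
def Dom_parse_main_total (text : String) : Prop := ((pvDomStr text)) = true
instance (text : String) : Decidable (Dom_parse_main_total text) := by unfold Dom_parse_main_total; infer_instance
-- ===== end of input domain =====

-- B replaces A's single-pass boolean-flag scan by a two-phase decomposition (group section bodies into a dict, then sum the '[main]' body); same return value, similar cost.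


-- ===== PORT A =====
-- one loop, state (in_main, saw_main, total); strings handled on the List Char side (PySem.Chars, exact)
def pmtStepA (st : Bool × Bool × Int) (raw : String) : Bool × Bool × Int :=
  let line := PySem.Chars.strip raw.toList
  if line.isEmpty then st
  else if PySem.Chars.startswith line "[".toList && PySem.Chars.endswith line "]".toList then
    if PySem.Chars.lower line == "[main]".toList then (true, true, st.2.2)
    else (false, st.2.1, st.2.2)
  else if !st.1 then st
  else
    match PySem.Chars.split₀Max line 1 with
    | [] => st
    | p :: _ =>
      match PySem.Int.ofChars? p with
      | none => st
      | some qty => if qty > 0 then (st.1, st.2.1, st.2.2 + qty) else st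

def parse_main_total (text : String) : Option Int :=
  let st := (PySem.Str.splitlines text).foldl pmtStepA (false, false, 0)
  if st.2.1 then some st.2.2 else none

-- ===== PORT B =====
-- phase 1: group lines into a dict header→body; phase 2: membership test + sum over bodies["[main]"]
def pmtGroupStep (st : Option (List Char) × PySem.Dict (List Char) (List (List Char)))
    (ln : List Char) : Option (List Char) × PySem.Dict (List Char) (List (List Char)) :=
  if PySem.Chars.startswith ln "[".toList && PySem.Chars.endswith ln "]".toList then
    let c := PySem.Chars.lower ln
    (some c, st.2.setdefault c [])
  else
    match st.1 with
    | none => st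
    | some c => (st.1, st.2.modify c [] (· ++ [ln]))

def pmtQtyStep (total : Int) (ln : List Char) : Int :=
  match PySem.Chars.split₀Max ln 1 with
  | [] => total
  | p :: _ =>
    match PySem.Int.ofChars? p with
    | none => total
    | some q => if q > 0 then total + q else total

def parse_main_total_alt (text : String) : Option Int :=
  let lines := ((PySem.Str.splitlines text).map (fun r => PySem.Chars.strip r.toList)).filter
    (fun l => !l.isEmpty)
  let st := lines.foldl pmtGroupStep (none, PySem.Dict.empty)
  match st.2.get? "[main]".toList with
  | none => none
  | some body => some (body.foldl pmtQtyStep 0)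

-- ===== PRECONDITION & SPEC =====
def Spec_parse_main_total (text : String) (out : Option Int) : Prop := out = parse_main_total_alt text
instance (text : String) (out : Option Int) : Decidable (Spec_parse_main_total text out) := by unfold Spec_parse_main_total; infer_instance

-- ===== CLAIM (what is proved, stated in full; the proofs are below) =====
def Claim_equal_parse_main_total : Prop := ∀ (text : String), Dom_parse_main_total text → Spec_parse_main_total text (parse_main_total text)

-- ===== LEMMAS AND PROOFS =====

-- A's loop body after the strip / blank-skip (operates on the already-stripped line)
def pmtStepA' (st : Bool × Bool × Int) (line : List Char) : Bool × Bool × Int :=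
  if PySem.Chars.startswith line "[".toList && PySem.Chars.endswith line "]".toList then
    if PySem.Chars.lower line == "[main]".toList then (true, true, st.2.2)
    else (false, st.2.1, st.2.2)
  else if !st.1 then st
  else
    match PySem.Chars.split₀Max line 1 with
    | [] => st
    | p :: _ =>
      match PySem.Int.ofChars? p with
      | none => st
      | some qty => if qty > 0 then (st.1, st.2.1, st.2.2 + qty) else st

lemma pmtFoldA_filter (raws : List String) (st : Bool × Bool × Int) :
    raws.foldl pmtStepA st =
      ((raws.map (fun r => PySem.Chars.strip r.toList)).filter (fun l => !l.isEmpty)).foldl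
        pmtStepA' st := by
  induction raws generalizing st with
  | nil => rfl
  | cons r rs ih =>
    by_cases h : (PySem.Chars.strip r.toList).isEmpty = true
    · have hs : pmtStepA st r = st := by simp [pmtStepA, h]
      simp [h, hs, ih]
    · have hs : pmtStepA st r = pmtStepA' st (PySem.Chars.strip r.toList) := by
        simp only [pmtStepA, pmtStepA']
        rw [if_neg h]
      simp [h, hs, ih]

lemma pmtInvariant (lines : List (List Char)) (st : Bool × Bool × Int)
    (current : Option (List Char)) (d : PySem.Dict (List Char) (List (List Char)))
    (h1 : st.1 = (current == some "[main]".toList))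
    (h2 : st.2.1 = d.contains "[main]".toList)
    (h3 : st.2.2 = (d.getD "[main]".toList []).foldl pmtQtyStep 0)
    (h4 : current = some "[main]".toList → d.contains "[main]".toList = true) :
    let a := lines.foldl pmtStepA' st
    let b := lines.foldl pmtGroupStep (current, d)
    a.1 = (b.1 == some "[main]".toList) ∧ a.2.1 = b.2.contains "[main]".toList ∧
      a.2.2 = (b.2.getD "[main]".toList []).foldl pmtQtyStep 0 := by
  have hml : "[main]".toList = ['[', 'm', 'a', 'i', 'n', ']'] := rfl
  induction lines generalizing st current d with
  | nil => exact ⟨h1, h2, h3⟩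
  | cons ln rest ih =>
    simp only [List.foldl_cons]
    by_cases hhd : (PySem.Chars.startswith ln "[".toList && PySem.Chars.endswith ln "]".toList) = true
    · have hB : pmtGroupStep (current, d) ln =
          (some (PySem.Chars.lower ln), d.setdefault (PySem.Chars.lower ln) []) := by
        simp only [pmtGroupStep]
        rw [if_pos hhd]
      by_cases hk : PySem.Chars.lower ln = "[main]".toList
      · -- a header equal to [main]
        have hA : pmtStepA' st ln = (true, true, st.2.2) := by
          simp only [pmtStepA']
          rw [if_pos hhd, if_pos (by simp [hk, hml])]
        rw [hA, hB, hk]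
        refine ih _ _ _ (by simp) (by simp [PySem.Dict.contains_setdefault]) ?_ ?_
        · rw [PySem.Dict.getD_setdefault_self]
          exact h3
        · intro _
          simp [PySem.Dict.contains_setdefault]
      · -- a header of another section
        have hk' : ¬ PySem.Chars.lower ln = ['[', 'm', 'a', 'i', 'n', ']'] := by
          rw [← hml]; exact hk
        have hA : pmtStepA' st ln = (false, st.2.1, st.2.2) := by
          simp only [pmtStepA']
          rw [if_pos hhd, if_neg (by simp [hml]; exact hk')]
        rw [hA, hB]
        refine ih _ _ _ (by simp [hk']) ?_ ?_ ?_
        · rw [PySem.Dict.contains_setdefault]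
          simp [Ne.symm hk', h2]
        · rw [PySem.Dict.getD_eq_get?_getD, PySem.Dict.get?_setdefault_of_ne _ _ (Ne.symm hk),
            ← PySem.Dict.getD_eq_get?_getD]
          exact h3
        · intro hc
          exact ((hk (Option.some.inj hc))).elim
    · -- not a header line
      rcases current with _ | c
      · -- no section header seen yet
        have hin : st.1 = false := by rw [h1]; rfl
        have hA : pmtStepA' st ln = st := by
          simp only [pmtStepA']
          rw [if_neg hhd, if_pos (by simp [hin])]
        have hB : pmtGroupStep (none, d) ln = (none, d) := by
          simp only [pmtGroupStep]
          rw [if_neg hhd]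
        rw [hA, hB]
        exact ih _ _ _ h1 h2 h3 (by simp)
      · have hB : pmtGroupStep (some c, d) ln = (some c, d.modify c [] (· ++ [ln])) := by
          simp only [pmtGroupStep]
          rw [if_neg hhd]
        by_cases hcm : c = "[main]".toList
        · -- a content line inside [main]
          subst hcm
          have hin : st.1 = true := by rw [h1]; simp
          have hctn : d.contains "[main]".toList = true := h4 rfl
          have hA : pmtStepA' st ln = (st.1, st.2.1, pmtQtyStep st.2.2 ln) := by
            simp only [pmtStepA', pmtQtyStep]
            rw [if_neg hhd, if_neg (by simp [hin])]
            cases hsp : PySem.Chars.split₀Max ln 1 with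
            | nil => simp
            | cons p ps =>
              cases hof : PySem.Int.ofChars? p with
              | none => simp [hof]
              | some q => by_cases hq : q > 0 <;> simp [hof, hq]
          rw [hA, hB]
          refine ih _ _ _ (by rw [hin]; simp) ?_ ?_ ?_
          · rw [h2, hctn, PySem.Dict.contains_modify]
            simp
          · rw [PySem.Dict.getD_modify_self, List.foldl_append]
            simp [h3]
          · intro _
            rw [PySem.Dict.contains_modify]
            simp
        · -- a content line inside some other section
          have hcm' : ¬ c = ['[', 'm', 'a', 'i', 'n', ']'] := by
            rw [← hml]; exact hcm
          have hin : st.1 = false := by rw [h1]; simp [hcm']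
          have hA : pmtStepA' st ln = st := by
            simp only [pmtStepA']
            rw [if_neg hhd, if_pos (by simp [hin])]
          rw [hA, hB]
          refine ih _ _ _ h1 ?_ ?_ ?_
          · rw [h2, PySem.Dict.contains_modify]
            simp [Ne.symm hcm']
          · rw [h3, PySem.Dict.getD_modify]
            simp [Ne.symm hcm']
          · intro hc
            exact ((hcm (Option.some.inj hc)).elim)

-- ===== VERDICT (by name: the statement is the Claim_ definition above) =====
theorem parse_main_total_spec : Claim_equal_parse_main_total := by
  intro text _
  unfold Spec_parse_main_total parse_main_total parse_main_total_alt
  rw [pmtFoldA_filter]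
  obtain ⟨h1, h2, h3⟩ := pmtInvariant
    (((PySem.Str.splitlines text).map (fun r => PySem.Chars.strip r.toList)).filter
      (fun l => !l.isEmpty))
    (false, false, 0) none PySem.Dict.empty (by simp) (by simp) (by simp) (by simp)
  have hml : ("[main]".toList : List Char) = ['[', 'm', 'a', 'i', 'n', ']'] := rfl
  rw [hml] at h2 h3
  cases hg : ((((PySem.Str.splitlines text).map (fun r => PySem.Chars.strip r.toList)).filter
      (fun l => !l.isEmpty)).foldl pmtGroupStep (none, PySem.Dict.empty)).2.get?
      ['[', 'm', 'a', 'i', 'n', ']'] with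
  | none =>
    have hc : ((((PySem.Str.splitlines text).map (fun r => PySem.Chars.strip r.toList)).filter
        (fun l => !l.isEmpty)).foldl pmtStepA' (false, false, 0)).2.1 = false := by
      rw [h2, PySem.Dict.contains_eq_isSome_get?, hg]; rfl
    simp [hc, hg]
  | some body =>
    have hc : ((((PySem.Str.splitlines text).map (fun r => PySem.Chars.strip r.toList)).filter
        (fun l => !l.isEmpty)).foldl pmtStepA' (false, false, 0)).2.1 = true := by
      rw [h2, PySem.Dict.contains_eq_isSome_get?, hg]; rfl
    have hb : ((((PySem.Str.splitlines text).map (fun r => PySem.Chars.strip r.toList)).filter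
        (fun l => !l.isEmpty)).foldl pmtStepA' (false, false, 0)).2.2 = body.foldl pmtQtyStep 0 := by
      rw [h3, PySem.Dict.getD_eq_get?_getD, hg]; rfl
    simp [hc, hb, hg]
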